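-- pv_equiv track=rewrite | github.com/ayushkumar802/bs_predictor | helper.py | longest_repeating_sequence
-- ===== SOURCE A (Python) =====
-- def longest_repeating_sequence(string, pattern):
--     max_length = 0
--     current_length = 0
--     i = 0
--     n = len(string)
--
--     while i < n - 1:
--         # Check if the current substring matches the pattern
--         if string[i:i + len(pattern)] == pattern:
--             current_length += 1
--             i += len(pattern)  # Move forward by the length of the pattern
--         else:
--             max_length = max(max_length, current_length)
--             current_length = 0
--             i += 1
--     max_length = max(max_length, current_length)
--
--     # Return the repeated pattern
--     return pattern * max_length
-- ===== SOURCE B (Python) =====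
-- def longest_repeating_sequence(string, pattern):
--     m = len(pattern)
--     # Phase 1: all (overlapping) occurrence start positions, found by the
--     # C-level substring search str.find jumping from match to match.
--     starts = []
--     j = string.find(pattern)
--     while j != -1:
--         starts.append(j)
--         j = string.find(pattern, j + 1)
--     # Phase 2: longest chain p, p+m, p+2m, ... over the occurrence list only.
--     best = cur = 0
--     nxt = 0
--     for p in starts:
--         if p < nxt:
--             continue
--         if p == nxt:
--             cur += 1
--         else:
--             if cur > best:
--                 best = cur
--             cur = 1
--         nxt = p + m
--     return pattern * max(best, cur)
-- ===== Notes on version B (the rewrite author's own statement) =====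
-- stated objective: faster
-- what changed: B replaces A's per-index scan with its per-position m-character slice comparison by a two-phase occurrence-list algorithm: it first collects all pattern occurrence positions with repeated C-level str.find (jumping from match to match), then folds the greedy chain (p, p+m, p+2m, ...) over that position list only; B also scans the full string instead of stopping one character early.
-- intended difference: For a single-character pattern whose longest run of that character reaches the end of the string and is strictly longer than every earlier run, A's loop bound 'i < n - 1' never examines the last character and returns the run one copy short (e.g. 'aa','a' -> 'a'); B counts the final character and returns the full run ('aa'), the intended value. — e.g. on longest_repeating_sequence("aa", "a"): A returns "a", B returns "aa"
import Mathlib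
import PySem

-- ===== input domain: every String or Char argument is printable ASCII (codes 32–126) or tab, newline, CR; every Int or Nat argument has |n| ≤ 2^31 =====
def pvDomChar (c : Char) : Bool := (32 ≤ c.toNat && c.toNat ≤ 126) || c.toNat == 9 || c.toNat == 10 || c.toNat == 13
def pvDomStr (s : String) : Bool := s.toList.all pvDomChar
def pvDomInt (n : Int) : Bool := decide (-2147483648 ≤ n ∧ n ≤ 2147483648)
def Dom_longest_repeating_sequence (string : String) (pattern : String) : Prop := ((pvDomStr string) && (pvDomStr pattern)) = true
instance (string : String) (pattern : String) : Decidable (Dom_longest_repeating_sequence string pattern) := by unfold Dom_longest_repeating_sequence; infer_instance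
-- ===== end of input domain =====

-- B replaces A's per-index slice-compare scan by occurrence-list processing: it first
-- collects ALL pattern occurrence positions with repeated str.find (library substring
-- search jumping match to match), then folds the greedy chain over that list only; B also
-- counts a final match of a single-character pattern at the last position, which A's
-- `i < n - 1` bound misses (see D_).

-- ===== PORT A =====
-- `pattern * k` (Python string repetition, k ≥ 0)
def pvRepeat (p : List Char) (k : Nat) : List Char := (List.replicate k p).flatten

-- the while loop: state (i, max_length, current_length); fuel n+1 is enough since i grows
-- by ≥ 1 each iteration for a non-empty pattern (the empty pattern is outside Pre_)
def lrsGoA (s p : List Char) (n : Nat) : Nat → Nat → Nat → Nat → Nat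
  | 0, _i, maxL, cur => max maxL cur
  | fuel + 1, i, maxL, cur =>
    if i < n - 1 then
      -- string[i:i+len(pattern)] == pattern; exact for 0 ≤ i
      if (s.drop i).take p.length = p then
        lrsGoA s p n fuel (i + p.length) maxL (cur + 1)
      else
        lrsGoA s p n fuel (i + 1) (max maxL cur) 0
    else max maxL cur

def longest_repeating_sequence (string : String) (pattern : String) : String :=
  let s := string.toList
  let p := pattern.toList
  let n := s.length
  String.ofList (pvRepeat p (lrsGoA s p n (n + 1) 0 0 0))

-- ===== PORT B =====
-- phase 1: `j = string.find(pattern)` then `while j != -1: starts.append(j); j = string.find(pattern, j+1)`.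
-- fuel n+2 bounds the loop: the found indices strictly increase inside [0, n], so there are
-- at most n+1 appends before find returns -1.
def lrsStarts (string pattern : String) : Nat → Int → List Int
  | 0, _ => []
  | fuel + 1, j =>
    if j ≠ -1 then j :: lrsStarts string pattern fuel (PySem.Str.findFrom string pattern (j + 1) none)
    else []

-- phase 2: the greedy chain fold over the occurrence list; state (best, cur, nxt)
def lrsChain (m : Int) : List Int → Int → Int → Int → Int × Int
  | [], best, cur, _nxt => (best, cur)
  | p :: ps, best, cur, nxt =>
    if p < nxt then lrsChain m ps best cur nxt
    else if p = nxt then lrsChain m ps best (cur + 1) (p + m)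
    else lrsChain m ps (if cur > best then cur else best) 1 (p + m)

def longest_repeating_sequence_alt (string : String) (pattern : String) : String :=
  let m : Int := (pattern.toList.length : Int)
  let starts := lrsStarts string pattern (string.toList.length + 2) (PySem.Str.find string pattern)
  let r := lrsChain m starts 0 0 0
  String.ofList (pvRepeat pattern.toList (max r.1 r.2).toNat)

-- ===== PRECONDITION & SPEC =====
-- Pre_ excludes only the inputs where A diverges: with an empty pattern A's loop never
-- advances (i += 0), so A loops forever whenever len(string) ≥ 2; elsewhere A returns.
def Pre_longest_repeating_sequence (string : String) (pattern : String) : Prop :=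
  ¬ (pattern.toList = [] ∧ 2 ≤ string.toList.length)
instance (string : String) (pattern : String) : Decidable (Pre_longest_repeating_sequence string pattern) := by
  unfold Pre_longest_repeating_sequence; infer_instance

def pvWitness_longest_repeating_sequence : String × String := ("abcababab", "ab")

-- longest run of consecutive copies of c in l (used only to state D_; independent of the ports)
def maxStreak (c : Char) (l : List Char) : Nat :=
  (l.foldl (fun br ch => if ch = c then (max br.1 (br.2 + 1), br.2 + 1) else (br.1, 0))
    ((0 : Nat), (0 : Nat))).1

-- On single-character patterns whose longest run of that character occurs only at the very
-- end of the string, A's loop bound `i < n - 1` never examines the last character and A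
-- returns a run one copy short; B counts the full final run, the intended value.
def D_longest_repeating_sequence (string : String) (pattern : String) : Prop :=
  pattern.toList.length = 1 ∧
    maxStreak (pattern.toList.headD ' ') string.toList ≠
      maxStreak (pattern.toList.headD ' ') string.toList.dropLast
instance (string : String) (pattern : String) : Decidable (D_longest_repeating_sequence string pattern) := by
  unfold D_longest_repeating_sequence; infer_instance

def Spec_longest_repeating_sequence (string : String) (pattern : String) (out : String) : Prop :=
  ¬ D_longest_repeating_sequence string pattern → out = longest_repeating_sequence_alt string pattern
instance (string : String) (pattern : String) (out : String) : Decidable (Spec_longest_repeating_sequence string pattern out) := by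
  unfold Spec_longest_repeating_sequence; infer_instance

def pvDiffWitness_longest_repeating_sequence : String × String := ("aa", "a")
def pvDiffWitnessOut_longest_repeating_sequence : String × String := ("a", "aa")

-- ===== CLAIM (what is proved, stated in full; the proofs are below) =====
def Claim_unchanged_longest_repeating_sequence : Prop := ∀ (string : String) (pattern : String), Dom_longest_repeating_sequence string pattern → Pre_longest_repeating_sequence string pattern → Spec_longest_repeating_sequence string pattern (longest_repeating_sequence string pattern)
def Claim_changed_longest_repeating_sequence : Prop := Dom_longest_repeating_sequence (pvDiffWitness_longest_repeating_sequence.1) (pvDiffWitness_longest_repeating_sequence.2) ∧ Pre_longest_repeating_sequence (pvDiffWitness_longest_repeating_sequence.1) (pvDiffWitness_longest_repeating_sequence.2) ∧ D_longest_repeating_sequence (pvDiffWitness_longest_repeating_sequence.1) (pvDiffWitness_longest_repeating_sequence.2) ∧ longest_repeating_sequence (pvDiffWitness_longest_repeating_sequence.1) (pvDiffWitness_longest_repeating_sequence.2) = pvDiffWitnessOut_longest_repeating_sequence.1 ∧ longest_repeating_sequence_alt (pvDiffWitness_longest_repeating_sequence.1) (pvDiffWitness_longest_repeating_sequence.2)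 = pvDiffWitnessOut_longest_repeating_sequence.2 ∧ pvDiffWitnessOut_longest_repeating_sequence.1 ≠ pvDiffWitnessOut_longest_repeating_sequence.2
def Claim_exact_longest_repeating_sequence : Prop := ∀ (string : String) (pattern : String), Dom_longest_repeating_sequence string pattern → Pre_longest_repeating_sequence string pattern → D_longest_repeating_sequence string pattern → longest_repeating_sequence string pattern ≠ longest_repeating_sequence_alt string pattern

-- ===== LEMMAS AND PROOFS =====

-- the match positions below bound b: indices i < b where string[i:i+m] == pattern
def occ (s p : List Char) (k b : Nat) : List Nat :=
  (List.range' k (b - k)).filter (fun i => decide ((s.drop i).take p.length = p))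

-- Nat mirror of lrsChain, and the final `max(best, cur)`
def gChainP (m : Nat) : List Nat → Nat → Nat → Nat → Nat × Nat
  | [], best, cur, _nxt => (best, cur)
  | p :: ps, best, cur, nxt =>
    if p < nxt then gChainP m ps best cur nxt
    else if p = nxt then gChainP m ps best (cur + 1) (p + m)
    else gChainP m ps (max best cur) 1 (p + m)

def gFinish (m : Nat) (l : List Nat) (b c nx : Nat) : Nat :=
  max (gChainP m l b c nx).1 (gChainP m l b c nx).2

theorem occ_nil (s p : List Char) (i b : Nat) (h : b ≤ i) : occ s p i b = [] := by
  unfold occ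
  rw [Nat.sub_eq_zero_of_le h]
  rfl

theorem occ_cons (s p : List Char) (i b : Nat) (h : i < b) :
    occ s p i b =
      (if (s.drop i).take p.length = p then [i] else []) ++ occ s p (i + 1) b := by
  unfold occ
  rw [show b - i = (b - (i + 1)) + 1 from by omega, List.range'_succ, List.filter_cons]
  by_cases hm : (s.drop i).take p.length = p <;> simp [hm]

theorem occ_mem_lt (s p : List Char) (i b : Nat) : ∀ x ∈ occ s p i b, x < b := by
  intro x hx
  unfold occ at hx
  have := (List.mem_filter.mp hx).1
  have := List.mem_range'_1.mp this
  omega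

theorem occ_split (s p : List Char) (i j b : Nat) (hij : i ≤ j) (hjb : j ≤ b) :
    occ s p i b =
      ((List.range' i (j - i)).filter (fun x => decide ((s.drop x).take p.length = p)))
        ++ occ s p j b := by
  unfold occ
  rw [show b - i = (j - i) + (b - j) from by omega, ← List.range'_append_1, List.filter_append,
    show i + (j - i) = j from by omega]

theorem gChainP_skip (m : Nat) :
    ∀ (l1 l2 : List Nat) (b c nx : Nat), (∀ x ∈ l1, x < nx) →
      gChainP m (l1 ++ l2) b c nx = gChainP m l2 b c nx := by
  intro l1
  induction l1 with
  | nil => intro l2 b c nx _; rfl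
  | cons x xs ih =>
    intro l2 b c nx h
    have hx : x < nx := h x (List.mem_cons_self)
    simp only [List.cons_append, gChainP, if_pos hx]
    exact ih l2 b c nx (fun y hy => h y (List.mem_cons_of_mem x hy))

-- MAIN: A's fused loop equals the greedy chain over the match-position list below n-1
theorem lrsGoA_eq_gFinish (s p : List Char) (hp : p ≠ []) (n : Nat) :
    ∀ (fuel i maxL cur best curB nxt : Nat),
      n - 1 ≤ fuel + i →
      ((nxt = i ∧ best = maxL ∧ curB = cur) ∨ (nxt < i ∧ cur = 0 ∧ maxL = max best curB)) →
      lrsGoA s p n fuel i maxL cur = gFinish p.length (occ s p i (n - 1)) best curB nxt := by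
  have hm1 : 1 ≤ p.length := List.length_pos_of_ne_nil hp
  intro fuel
  induction fuel with
  | zero =>
    intro i maxL cur best curB nxt hb hmode
    rw [occ_nil s p i (n - 1) (by omega), lrsGoA]
    unfold gFinish
    simp only [gChainP]
    rcases hmode with ⟨_, rfl, rfl⟩ | ⟨_, rfl, rfl⟩ <;> omega
  | succ fuel ih =>
    intro i maxL cur best curB nxt hb hmode
    rw [lrsGoA]
    by_cases hi : i < n - 1
    · rw [if_pos hi, occ_cons s p i (n - 1) hi]
      by_cases hm : (s.drop i).take p.length = p
      · rw [if_pos hm, if_pos hm, List.singleton_append]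
        -- head i of the occurrence list: both modes lead to state (maxL, cur+1, i+len p)
        have hhead : gFinish p.length (i :: occ s p (i + 1) (n - 1)) best curB nxt =
            gFinish p.length (occ s p (i + 1) (n - 1)) maxL (cur + 1) (i + p.length) := by
          rcases hmode with ⟨rfl, rfl, rfl⟩ | ⟨hlt, rfl, hml⟩
          · unfold gFinish
            simp [gChainP]
          · have c1 : ¬ (i < nxt) := by omega
            have c2 : ¬ (i = nxt) := by omega
            unfold gFinish
            simp [gChainP, c1, c2, hml]
        rw [hhead]
        by_cases hfar : i + p.length ≤ n - 1
        · -- split the remaining occurrences at i + len p; the early ones are skipped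
          rw [occ_split s p (i + 1) (i + p.length) (n - 1) (by omega) hfar]
          unfold gFinish
          rw [gChainP_skip p.length _ _ maxL (cur + 1) (i + p.length) (by
            intro x hx
            have := (List.mem_filter.mp hx).1
            have := List.mem_range'_1.mp this
            omega)]
          exact ih (i + p.length) maxL (cur + 1) maxL (cur + 1) (i + p.length)
            (by omega) (Or.inl ⟨rfl, rfl, rfl⟩)
        · -- the pattern jump leaves the scanned region: everything remaining is skipped
          unfold gFinish
          rw [show occ s p (i + 1) (n - 1) = occ s p (i + 1) (n - 1) ++ [] from
            (List.append_nil _).symm]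
          rw [gChainP_skip p.length _ _ maxL (cur + 1) (i + p.length) (by
            intro x hx
            have := occ_mem_lt s p (i + 1) (n - 1) x hx
            omega)]
          have hstop : lrsGoA s p n fuel (i + p.length) maxL (cur + 1) = max maxL (cur + 1) := by
            cases fuel with
            | zero => rfl
            | succ f => rw [lrsGoA, if_neg (by omega : ¬ i + p.length < n - 1)]
          rw [hstop]
          rfl
      · rw [if_neg hm, if_neg hm, List.nil_append]
        refine ih (i + 1) (max maxL cur) 0 best curB nxt (by omega) (Or.inr ⟨?_, rfl, ?_⟩)
        · rcases hmode with ⟨rfl, _, _⟩ | ⟨hlt, _, _⟩ <;> omega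
        · rcases hmode with ⟨_, rfl, rfl⟩ | ⟨_, rfl, rfl⟩ <;> omega
    · rw [if_neg hi, occ_nil s p i (n - 1) (by omega)]
      unfold gFinish
      simp only [gChainP]
      rcases hmode with ⟨_, rfl, rfl⟩ | ⟨_, rfl, rfl⟩ <;> omega

-- an index that matches is exactly an index where the pattern is a prefix of the rest
theorem match_iff_prefix (s p : List Char) (i : Nat) :
    (s.drop i).take p.length = p ↔ p <+: s.drop i := by
  rw [List.prefix_iff_eq_take]
  constructor <;> (intro h; exact h.symm)

-- the find loop produces exactly the match positions ≥ k (as Ints, increasing)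
theorem lrsStarts_from (string pattern : String) (hp : pattern.toList ≠ []) :
    ∀ (fuel k : Nat), k ≤ string.toList.length →
      string.toList.length + 1 ≤ fuel + k →
      lrsStarts string pattern fuel (PySem.Str.findFrom string pattern (k : Int) none) =
        (occ string.toList pattern.toList k string.toList.length).map (Nat.cast) := by
  intro fuel
  induction fuel with
  | zero => intro k hk hf; omega
  | succ fuel ih =>
    intro k hk hf
    by_cases hneg : PySem.Str.findFrom string pattern (k : Int) none = -1
    · -- no further occurrence: the loop stops and there is no match position ≥ k
      rw [lrsStarts, if_neg (by simpa using hneg)]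
      have hno : ¬ pattern.toList <:+: string.toList.drop k := by
        rw [← PySem.Chars.findFrom_natCast_eq_neg_one_iff string.toList pattern.toList k hk]
        simpa using hneg
      have : occ string.toList pattern.toList k string.toList.length = [] := by
        unfold occ
        rw [List.filter_eq_nil_iff]
        intro i hi
        have hik := List.mem_range'_1.mp hi
        simp only [decide_eq_true_eq]
        intro he
        apply hno
        have hpre : pattern.toList <+: string.toList.drop i := (match_iff_prefix _ _ _).mp he
        have hsuf : string.toList.drop i <:+ string.toList.drop k := by
          rw [show i = k + (i - k) from by omega, ← List.drop_drop]
          exact List.drop_suffix _ _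
        exact hpre.isInfix.trans hsuf.isInfix
      rw [this]
      rfl
    · -- a next occurrence q: emit it and continue from q+1
      have hneg' : PySem.Chars.findFrom string.toList pattern.toList (k : Int) none ≠ -1 := by
        simpa using hneg
      obtain ⟨hge, hprefix, hmin⟩ :=
        PySem.Chars.findFrom_natCast_spec string.toList pattern.toList k hk hneg'
      set r := PySem.Chars.findFrom string.toList pattern.toList (k : Int) none with hr
      have hr0 : 0 ≤ r := le_trans (by exact_mod_cast Int.natCast_nonneg k) hge
      have hrq : r = ((r.toNat : Nat) : Int) := (Int.toNat_of_nonneg hr0).symm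
      have hqn : r.toNat < string.toList.length := by
        have hlen := hprefix.length_le
        have hplen : 1 ≤ pattern.toList.length := List.length_pos_of_ne_nil hp
        simp only [List.length_drop] at hlen
        omega
      have hkq : k ≤ r.toNat := by omega
      rw [lrsStarts]
      rw [show PySem.Str.findFrom string pattern (k : Int) none = r from by simpa using hr.symm]
      rw [if_pos hneg']
      have hrec : lrsStarts string pattern fuel
          (PySem.Str.findFrom string pattern ((r.toNat + 1 : Nat) : Int) none) =
          (occ string.toList pattern.toList (r.toNat + 1) string.toList.length).map (Nat.cast) :=
        ih (r.toNat + 1) (by omega) (by omega)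
      rw [show r + 1 = ((r.toNat + 1 : Nat) : Int) from by omega, hrec]
      -- the match positions from k: none in [k, q), q itself, then the rest
      rw [occ_split string.toList pattern.toList k r.toNat string.toList.length hkq (by omega)]
      have hempty : (List.range' k (r.toNat - k)).filter
          (fun x => decide ((string.toList.drop x).take pattern.toList.length = pattern.toList)) = [] := by
        rw [List.filter_eq_nil_iff]
        intro i hi
        have hik := List.mem_range'_1.mp hi
        simp only [decide_eq_true_eq]
        intro he
        exact hmin i (by omega) (by omega) ((match_iff_prefix _ _ _).mp he)
      rw [hempty, List.nil_append,
        occ_cons string.toList pattern.toList r.toNat string.toList.length hqn,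
        if_pos ((match_iff_prefix _ _ _).mpr hprefix), List.singleton_append, List.map_cons]
      rw [hrq]
      simp

theorem lrsStarts_eq_occ (string pattern : String) (hp : pattern.toList ≠ []) :
    lrsStarts string pattern (string.toList.length + 2) (PySem.Str.find string pattern) =
      (occ string.toList pattern.toList 0 string.toList.length).map (Nat.cast) := by
  have h0 : PySem.Str.find string pattern =
      PySem.Str.findFrom string pattern ((0 : Nat) : Int) none := by
    simp
  rw [h0]
  exact lrsStarts_from string pattern hp (string.toList.length + 2) 0 (by omega) (by omega)

-- casting the chain fold from Int to Nat
theorem lrsChain_cast (m : Nat) :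
    ∀ (l : List Nat) (b c nx : Nat),
      lrsChain (m : Int) (l.map (Nat.cast)) (b : Int) (c : Int) (nx : Int) =
        (((gChainP m l b c nx).1 : Int), ((gChainP m l b c nx).2 : Int)) := by
  intro l
  induction l with
  | nil => intro b c nx; rfl
  | cons x xs ih =>
    intro b c nx
    simp only [List.map_cons, lrsChain, gChainP]
    by_cases h1 : x < nx
    · rw [if_pos (by exact_mod_cast h1), if_pos h1, ih]
    · rw [if_neg (by exact_mod_cast h1), if_neg h1]
      by_cases h2 : x = nx
      · rw [if_pos (by exact_mod_cast h2), if_pos h2]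
        rw [show ((x : Int) + (m : Int)) = ((x + m : Nat) : Int) from by push_cast; ring,
          show ((c : Int) + 1) = ((c + 1 : Nat) : Int) from by push_cast; ring, ih]
      · rw [if_neg (by exact_mod_cast h2), if_neg h2]
        rw [show ((x : Int) + (m : Int)) = ((x + m : Nat) : Int) from by push_cast; ring]
        have : (if (c : Int) > (b : Int) then (c : Int) else (b : Int)) = ((max b c : Nat) : Int) := by
          split <;> [skip; skip] <;> push_cast <;> omega
        rw [this, show ((1 : Int)) = ((1 : Nat) : Int) from rfl, ih]

-- B computes the chain over ALL match positions
theorem altB_eq_gFinish (string pattern : String) (hp : pattern.toList ≠ []) :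
    longest_repeating_sequence_alt string pattern =
      String.ofList (pvRepeat pattern.toList
        (gFinish pattern.toList.length
          (occ string.toList pattern.toList 0 string.toList.length) 0 0 0)) := by
  unfold longest_repeating_sequence_alt
  simp only []
  rw [lrsStarts_eq_occ string pattern hp,
    show (0 : Int) = ((0 : Nat) : Int) from rfl, lrsChain_cast]
  unfold gFinish
  congr 1
  rw [← Nat.cast_max, Int.toNat_natCast]

-- for patterns of length ≥ 2 the position n-1 can never match
theorem occ_bound_eq (s p : List Char) (h2 : 2 ≤ p.length) :
    occ s p 0 (s.length - 1) = occ s p 0 s.length := by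
  rcases Nat.eq_zero_or_pos s.length with h0 | h0
  · simp [occ, h0]
  · unfold occ
    simp only [Nat.sub_zero]
    rw [show s.length = (s.length - 1) + 1 from by omega, List.range'_1_concat]
    rw [List.filter_append]
    have hpred : ¬ ((s.drop (s.length - 1)).take p.length = p) := by
      intro he
      have := congrArg List.length he
      simp at this
      omega
    simp [hpred]

-- single-character machinery -------------------------------------------------
def cpos (c : Char) : List Char → Nat → List Nat
  | [], _ => []
  | x :: xs, k => (if x = c then [k] else []) ++ cpos c xs (k + 1)

theorem occ_single (s : List Char) (c : Char) (b : Nat) (hb : b ≤ s.length) :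
    occ s [c] 0 b = cpos c (s.take b) 0 := by
  have main : ∀ (d k : Nat), k + d ≤ s.length →
      (List.range' k d).filter (fun i => decide ((s.drop i).take 1 = [c])) =
        cpos c ((s.take (k + d)).drop k) k := by
    intro d
    induction d with
    | zero =>
      intro k hk
      have : (s.take (k + 0)).drop k = [] := by
        apply List.drop_eq_nil_of_le
        simp
      simp [this, cpos]
    | succ d ih =>
      intro k hk
      have hkn : k < s.length := by omega
      have hdrop : (s.take (k + (d + 1))).drop k
          = s[k] :: ((s.take (k + (d + 1))).drop (k + 1)) := by
        rw [List.drop_eq_getElem_cons (by simp; omega)]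
        congr 1
        simp
      have htk : (s.take (k + (d + 1))).drop (k + 1) = (s.take ((k + 1) + d)).drop (k + 1) := by
        rw [show k + (d + 1) = (k + 1) + d from by omega]
      have hsl : (s.drop k).take 1 = [s[k]] := by
        rw [List.drop_eq_getElem_cons hkn]
        rfl
      rw [List.range'_succ, List.filter_cons, hdrop, htk, cpos, ← ih (k + 1) (by omega)]
      by_cases h : s[k] = c
      · simp [hsl, h]
      · simp [hsl, h]
  have := main b 0 (by omega)
  simpa using this

-- the first component of the streak fold extracts as a max
theorem streak_fold_split (c : Char) :
    ∀ (l : List Char) (b r : Nat),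
      (l.foldl (fun br ch => if ch = c then (max br.1 (br.2 + 1), br.2 + 1) else (br.1, 0)) (b, r)).2
        = (l.foldl (fun br ch => if ch = c then (max br.1 (br.2 + 1), br.2 + 1) else (br.1, 0)) (0, r)).2
      ∧ (l.foldl (fun br ch => if ch = c then (max br.1 (br.2 + 1), br.2 + 1) else (br.1, 0)) (b, r)).1
        = max b (l.foldl (fun br ch => if ch = c then (max br.1 (br.2 + 1), br.2 + 1) else (br.1, 0)) (0, r)).1 := by
  intro l
  induction l with
  | nil => intro b r; simp
  | cons x xs ih =>
    intro b r
    by_cases h : x = c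
    · simp only [List.foldl_cons, if_pos h]
      refine ⟨(ih (max b (r + 1)) (r + 1)).1.trans ((ih (max 0 (r + 1)) (r + 1)).1).symm, ?_⟩
      rw [(ih (max b (r + 1)) (r + 1)).2, (ih (max 0 (r + 1)) (r + 1)).2]
      omega
    · simp only [List.foldl_cons, if_neg h]
      exact ih b 0

theorem gChainP_streak (c : Char) :
    ∀ (l : List Char) (k b cu nxt : Nat), nxt ≤ k →
      gFinish 1 (cpos c l k) b cu nxt =
        max (if nxt = k then b else max b cu)
          ((l.foldl (fun br ch => if ch = c then (max br.1 (br.2 + 1), br.2 + 1) else (br.1, 0))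
            ((if nxt = k then cu else 0), (if nxt = k then cu else 0))).1) := by
  intro l
  induction l with
  | nil =>
    intro k b cu nxt hle
    by_cases h : nxt = k <;> simp [cpos, gFinish, gChainP, h] <;> omega
  | cons x xs ih =>
    intro k b cu nxt hle
    by_cases h : x = c
    · by_cases he : nxt = k
      · subst he
        have h1 : ¬ (nxt < nxt) := lt_irrefl nxt
        simp only [cpos, h, eq_self_iff_true, if_true, List.singleton_append, gFinish, gChainP,
          if_neg h1, List.foldl_cons]
        have hih := ih (nxt + 1) b (cu + 1) (nxt + 1) (le_refl _)
        simp only [eq_self_iff_true, if_true, gFinish] at hih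
        rw [hih, show max cu (cu + 1) = cu + 1 from by omega]
      · have h1 : ¬ (k < nxt) := by omega
        have h2 : ¬ (k = nxt) := fun hh => he hh.symm
        simp only [cpos, h, eq_self_iff_true, if_true, List.singleton_append, gFinish, gChainP,
          if_neg h1, if_neg h2, List.foldl_cons, if_neg he]
        have hih := ih (k + 1) (max b cu) 1 (k + 1) (le_refl _)
        simp only [eq_self_iff_true, if_true, gFinish] at hih
        rw [hih, show max 0 (0 + 1) = 1 from rfl]
    · have hne : ¬ (nxt = k + 1) := by omega
      simp only [cpos, if_neg h, List.nil_append, List.foldl_cons]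
      have hih := ih (k + 1) b cu nxt (by omega)
      simp only [if_neg hne] at hih
      rw [hih]
      by_cases he : nxt = k
      · simp only [if_pos he, if_neg h]
        rw [(streak_fold_split c xs cu 0).2, Nat.max_assoc]
      · simp only [if_neg he, if_neg h]

theorem gFinish_streak (c : Char) (l : List Char) :
    gFinish 1 (cpos c l 0) 0 0 0 = maxStreak c l := by
  have hf := gChainP_streak c l 0 0 0 0 (le_refl 0)
  simp only [if_pos rfl] at hf
  rw [hf]
  unfold maxStreak
  exact Nat.zero_max _

theorem pvRepeat_nil (k : Nat) : pvRepeat [] k = [] := by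
  induction k with
  | zero => rfl
  | succ k ih => simpa [pvRepeat, List.replicate_succ] using ih

theorem pvRepeat_singleton (c : Char) (k : Nat) : pvRepeat [c] k = List.replicate k c := by
  induction k with
  | zero => rfl
  | succ k ih =>
    simp only [pvRepeat, List.replicate_succ, List.flatten_cons] at ih ⊢
    rw [ih]
    rfl

theorem singleton_of_length_one {p : List Char} (h : p.length = 1) : p = [p.headD ' '] := by
  cases p with
  | nil => simp at h
  | cons a t => cases t with
    | nil => rfl
    | cons b t' => simp at h

-- both sides, reduced
theorem sideA (string pattern : String) (hp : pattern.toList ≠ []) :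
    longest_repeating_sequence string pattern =
      String.ofList (pvRepeat pattern.toList
        (gFinish pattern.toList.length
          (occ string.toList pattern.toList 0 (string.toList.length - 1)) 0 0 0)) := by
  unfold longest_repeating_sequence
  simp only []
  rw [lrsGoA_eq_gFinish string.toList pattern.toList hp string.toList.length
    (string.toList.length + 1) 0 0 0 0 0 0 (by omega) (Or.inl ⟨rfl, rfl, rfl⟩)]

-- ===== VERDICT (by name: the statement is the Claim_ definition above) =====
theorem longest_repeating_sequence_spec : Claim_unchanged_longest_repeating_sequence := by
  intro string pattern _hdom hpre hnd
  by_cases hp0 : pattern.toList = []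
  · -- empty pattern, string of length ≤ 1: A's loop body never runs, B finds no chain
    have hn : string.toList.length ≤ 1 := by
      by_contra hgt
      exact hpre ⟨hp0, by omega⟩
    unfold longest_repeating_sequence longest_repeating_sequence_alt
    simp only []
    rw [lrsGoA, if_neg (by omega : ¬ (0 : Nat) < string.toList.length - 1), hp0,
      pvRepeat_nil, pvRepeat_nil]
  have hp : pattern.toList ≠ [] := hp0
  rw [sideA string pattern hp, altB_eq_gFinish string pattern hp]
  by_cases h2 : 2 ≤ pattern.toList.length
  · rw [occ_bound_eq string.toList pattern.toList h2]
  · have h1 : pattern.toList.length = 1 := by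
      have := List.length_pos_of_ne_nil hp
      omega
    have hc : pattern.toList = [pattern.toList.headD ' '] := singleton_of_length_one h1
    have hstreak : maxStreak (pattern.toList.headD ' ') string.toList =
        maxStreak (pattern.toList.headD ' ') string.toList.dropLast := by
      by_contra hne
      exact hnd ⟨h1, hne⟩
    rw [hc]
    simp only [List.length_singleton]
    rw [occ_single string.toList _ (string.toList.length - 1) (by omega),
      occ_single string.toList _ string.toList.length (le_refl _),
      gFinish_streak, gFinish_streak, ← List.dropLast_eq_take, List.take_length, hstreak]

theorem longest_repeating_sequence_changed : Claim_changed_longest_repeating_sequence := by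
  unfold Claim_changed_longest_repeating_sequence; decide

theorem longest_repeating_sequence_tight : Claim_exact_longest_repeating_sequence := by
  intro string pattern _hdom _hpre hd
  obtain ⟨h1, hne⟩ := hd
  have hp : pattern.toList ≠ [] := by
    intro h
    rw [h] at h1
    simp at h1
  have hc : pattern.toList = [pattern.toList.headD ' '] := singleton_of_length_one h1
  rw [sideA string pattern hp, altB_eq_gFinish string pattern hp, hc]
  simp only [List.length_singleton]
  rw [occ_single string.toList _ (string.toList.length - 1) (by omega),
    occ_single string.toList _ string.toList.length (le_refl _),
    gFinish_streak, gFinish_streak, ← List.dropLast_eq_take, List.take_length,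
    pvRepeat_singleton, pvRepeat_singleton]
  intro h
  apply hne
  have h2 := congrArg String.toList h
  simp only [String.toList_ofList] at h2
  have h3 := congrArg List.length h2
  simpa using h3.symm
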